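-- pv_equiv track=rewrite | github.com/Elder19/ING-COMPUTACION | intro y taller semestre 1/taller/labs-examen/examen 1 intro.py | adyacentesimpar
-- ===== SOURCE A (Python) =====
-- def adyacentesimpar(num):
--     digito1=0
--     digito2=0
--
--     if isinstance (num,int):
--         while num>0:
--             digito1=num%10
--             num=num//10
--             digito2=num%10
--             num=num//10
--             if (digito1+digito2)%2!=0:
--                 continue
--             else:
--                 return False
--         return True
--     else:
--         return "numero debe ser entero"
-- ===== SOURCE B (Python) =====
-- def adyacentesimpar(num):
--     if isinstance(num, int):
--         digits = []
--         while num > 0: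
--             digits.append(num % 10)
--             num //= 10
--         return pares_impares(digits)
--     else:
--         return "numero debe ser entero"
--
--
-- def pares_impares(digits):
--     if not digits:
--         return True
--     d1 = digits[0]
--     d2 = digits[1] if len(digits) > 1 else 0
--     if (d1 + d2) % 2 == 0:
--         return False
--     return pares_impares(digits[2:])
-- ===== Notes on version B (the rewrite author's own statement) =====
-- stated objective: alternative
-- what changed: A checks pairs inside one fused numeric while-loop; B first extracts the digit list in one pass and then checks adjacent pairs by structural recursion over that list.
import Mathlib
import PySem

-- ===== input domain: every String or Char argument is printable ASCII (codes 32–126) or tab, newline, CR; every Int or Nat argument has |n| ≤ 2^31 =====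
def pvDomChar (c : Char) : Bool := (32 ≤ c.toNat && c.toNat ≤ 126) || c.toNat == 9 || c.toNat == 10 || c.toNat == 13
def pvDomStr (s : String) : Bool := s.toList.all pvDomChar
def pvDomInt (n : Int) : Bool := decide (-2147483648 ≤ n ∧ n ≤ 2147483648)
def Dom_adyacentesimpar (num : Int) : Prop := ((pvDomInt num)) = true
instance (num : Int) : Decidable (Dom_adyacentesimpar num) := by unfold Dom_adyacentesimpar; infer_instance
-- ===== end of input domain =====

-- B restructures A's fused numeric while-loop into two phases (extract the digit list,
-- then recurse over the list in pairs); same return value everywhere (objective: alternative).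

-- ===== PORT A =====
-- A's while-loop: peel digito1 = num%10, num//=10, digito2 = num%10, num//=10 each round,
-- return False on an even pair, True when the loop ends (the assignments are inlined).
def adyacentesimpar (num : Int) : Bool :=
  if num > 0 then
    if PySem.Int.mod (PySem.Int.mod num 10 + PySem.Int.mod (PySem.Int.floordiv num 10) 10) 2 ≠ 0 then
      adyacentesimpar (PySem.Int.floordiv (PySem.Int.floordiv num 10) 10)
    else false
  else true
termination_by num.toNat
decreasing_by
  simp only [PySem.Int.floordiv_eq_ediv_of_pos (by norm_num : (0:Int) < 10)]
  omega

-- ===== PORT B =====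
-- Source B's first while-loop: collect the digits of num, least significant first
def pvDigits (num : Int) : List Int :=
  if num > 0 then PySem.Int.mod num 10 :: pvDigits (PySem.Int.floordiv num 10) else []
termination_by num.toNat
decreasing_by
  simp only [PySem.Int.floordiv_eq_ediv_of_pos (by norm_num : (0:Int) < 10)]
  omega

-- Source B's pares_impares: structural recursion over the digit list, two digits at a time
def pvParesImpares (digits : List Int) : Bool :=
  match digits with
  | [] => true
  | d1 :: rest =>
    let d2 : Int := match rest with | [] => 0 | x :: _ => x   -- digits[1] if len(digits) > 1 else 0
    if PySem.Int.mod (d1 + d2) 2 = 0 then false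
    else pvParesImpares (PySem.List.slice (d1 :: rest) (some 2))   -- digits[2:]
termination_by digits.length
decreasing_by
  rw [PySem.List.slice_from _ (by norm_num : (0:Int) ≤ 2)]
  simp

def adyacentesimpar_alt (num : Int) : Bool := pvParesImpares (pvDigits num)

-- ===== PRECONDITION & SPEC =====
def Spec_adyacentesimpar (num : Int) (out : Bool) : Prop := out = adyacentesimpar_alt num
instance (num : Int) (out : Bool) : Decidable (Spec_adyacentesimpar num out) := by unfold Spec_adyacentesimpar; infer_instance

-- ===== CLAIM (what is proved, stated in full; the proofs are below) =====
def Claim_equal_adyacentesimpar : Prop := ∀ (num : Int), Dom_adyacentesimpar num → Spec_adyacentesimpar num (adyacentesimpar num)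

-- ===== LEMMAS AND PROOFS =====

theorem pvSlice_two_cons (a b : Int) (l : List Int) :
    PySem.List.slice (a :: b :: l) (some 2) = l := by
  rw [PySem.List.slice_from _ (by norm_num : (0:Int) ≤ 2)]
  rfl

theorem pvSlice_two_single (a : Int) :
    PySem.List.slice ([a] : List Int) (some 2) = [] := by
  rw [PySem.List.slice_from _ (by norm_num : (0:Int) ≤ 2)]
  rfl

theorem ppi_nil : pvParesImpares [] = true := by rw [pvParesImpares]

theorem ppi_cons (d1 d2 : Int) (l : List Int) :
    pvParesImpares (d1 :: d2 :: l)
      = if PySem.Int.mod (d1 + d2) 2 = 0 then false else pvParesImpares l := by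
  rw [pvParesImpares, pvSlice_two_cons]

theorem ppi_single (d : Int) :
    pvParesImpares [d] = if PySem.Int.mod (d + 0) 2 = 0 then false else true := by
  rw [pvParesImpares, pvSlice_two_single, ppi_nil]

theorem pv_main_aux : ∀ (k : Nat) (num : Int), num.toNat ≤ k →
    adyacentesimpar num = pvParesImpares (pvDigits num) := by
  intro k
  induction k with
  | zero =>
    intro num hk
    have hn : ¬ num > 0 := by omega
    rw [adyacentesimpar, if_neg hn, pvDigits, if_neg hn, ppi_nil]
  | succ k ih =>
    intro num hk
    by_cases hn : num > 0
    · have hfd : PySem.Int.floordiv num 10 = num / 10 :=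
        PySem.Int.floordiv_eq_ediv_of_pos (by norm_num)
      rw [adyacentesimpar, if_pos hn, pvDigits, if_pos hn]
      by_cases h1 : PySem.Int.floordiv num 10 > 0
      · rw [pvDigits, if_pos h1, ppi_cons]
        have hfd2 : PySem.Int.floordiv (PySem.Int.floordiv num 10) 10
            = num / 10 / 10 := by
          rw [hfd]; exact PySem.Int.floordiv_eq_ediv_of_pos (by norm_num)
        have hrec : adyacentesimpar (PySem.Int.floordiv (PySem.Int.floordiv num 10) 10)
            = pvParesImpares (pvDigits (PySem.Int.floordiv (PySem.Int.floordiv num 10) 10)) := by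
          apply ih
          rw [hfd2]; omega
        by_cases hodd : PySem.Int.mod (PySem.Int.mod num 10 + PySem.Int.mod (PySem.Int.floordiv num 10) 10) 2 = 0
        · rw [if_neg (by simpa using hodd), if_pos hodd]
        · rw [if_pos hodd, if_neg hodd, hrec]
      · have hz : PySem.Int.floordiv num 10 = 0 := by
          rw [hfd] at h1 ⊢; omega
        rw [pvDigits, if_neg h1, ppi_single]
        have hm0 : PySem.Int.mod (PySem.Int.floordiv num 10) 10 = 0 := by
          rw [hz]; decide
        have hf0 : PySem.Int.floordiv (PySem.Int.floordiv num 10) 10 = 0 := by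
          rw [hz]; decide
        rw [hm0, hf0]
        by_cases hodd : PySem.Int.mod (PySem.Int.mod num 10 + 0) 2 = 0
        · rw [if_neg (by simpa using hodd), if_pos hodd]
        · rw [if_pos hodd, if_neg hodd, adyacentesimpar, if_neg (by omega)]
    · rw [adyacentesimpar, if_neg hn, pvDigits, if_neg hn, ppi_nil]

-- ===== VERDICT (by name: the statement is the Claim_ definition above) =====
theorem adyacentesimpar_spec : Claim_equal_adyacentesimpar := by
  intro num _
  unfold Spec_adyacentesimpar adyacentesimpar_alt
  exact pv_main_aux num.toNat num le_rfl
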